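-- pv_equiv track=rewrite | github.com/Mohamed-diabakhate/monolith | estfor/scripts/generate_estfor_constants.py | generate_python_constants
-- ===== SOURCE A (Python) =====
-- from typing import Dict, List, Tuple, Optional
--
-- def generate_python_constants(constants: Dict[str, any]) -> str:
--     """Generate Python constant definitions."""
--     code = "# Game Constants\n"
--
--     # Group constants by prefix
--     grouped = {}
--     for name, value in sorted(constants.items()):
--         if '_' in name:
--             prefix = name.split('_')[0]
--             if prefix not in grouped:
--                 grouped[prefix] = []
--             grouped[prefix].append((name, value))
--         else:
--             if 'MISC' not in grouped:
--                 grouped['MISC'] = []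
--             grouped['MISC'].append((name, value))
--
--     # Generate grouped constants
--     for group, items in sorted(grouped.items()):
--         if group != 'MISC':
--             code += f"\n# {group.title()} Items\n"
--         else:
--             code += f"\n# Miscellaneous\n"
--
--         for name, value in items:
--             code += f"{name} = {value}\n"
--
--     return code
-- ===== SOURCE B (Python) =====
-- def generate_python_constants(constants):
--     """Generate Python constant definitions (flat sorted scan, no bucket dict)."""
--     items = sorted(constants.items())
--
--     def group_of(name):
--         return name.split('_')[0] if '_' in name else 'MISC'
--
--     groups = sorted({group_of(name) for name, _ in items})
--     parts = ["# Game Constants\n"]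
--     for group in groups:
--         parts.append("\n# Miscellaneous\n" if group == 'MISC'
--                      else f"\n# {group.title()} Items\n")
--         parts.extend(f"{name} = {value}\n"
--                      for name, value in items if group_of(name) == group)
--     return "".join(parts)
-- ===== Notes on version B (the rewrite author's own statement) =====
-- stated objective: simpler
-- what changed: Replaces A's bucket-dict construction (conditional key initialisation + append per item, then a nested loop over sorted dict items) with a flat decomposition: sort the items once, compute the sorted set of group keys, and emit each group's header plus a per-group filter of the sorted items, joining the collected parts at the end.
import Mathlib
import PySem

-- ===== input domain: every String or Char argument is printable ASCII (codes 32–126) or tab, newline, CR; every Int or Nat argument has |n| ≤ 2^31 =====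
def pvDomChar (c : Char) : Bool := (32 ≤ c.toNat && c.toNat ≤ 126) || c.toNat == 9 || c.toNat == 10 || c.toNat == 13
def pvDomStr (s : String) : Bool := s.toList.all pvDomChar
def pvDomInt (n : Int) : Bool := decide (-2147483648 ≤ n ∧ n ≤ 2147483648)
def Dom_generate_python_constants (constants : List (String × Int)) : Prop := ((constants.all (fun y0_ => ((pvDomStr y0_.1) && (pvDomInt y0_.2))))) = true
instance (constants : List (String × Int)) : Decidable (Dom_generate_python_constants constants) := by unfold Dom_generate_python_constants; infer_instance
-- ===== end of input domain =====

-- ===== PORT A =====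
-- B replaces A's bucket-dict build + nested emission loop by a flat per-group filter over the
-- once-sorted items (objective: simpler decomposition, same observable result; no speed claim).

-- Python str.title(), ported by hand (exact on the ASCII domain, where 'cased' = 'alphabetic'):
-- a letter is uppercased after a non-letter and lowercased after a letter; other chars unchanged.
def pyTitleGo : List Char → Bool → List Char
  | [], _ => []
  | c :: rest, prevCased =>
    (if PySem.Chars.isalpha c then
       (if prevCased then PySem.Chars.lowerChar c else PySem.Chars.upperChar c)
     else c) :: pyTitleGo rest (PySem.Chars.isalpha c)

def pyTitle (s : String) : String := String.ofList (pyTitleGo s.toList false)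

def generate_python_constants (constants : List (String × Int)) : String :=
  let code := "# Game Constants\n"
  -- sorted(constants.items()): Python tuple order = lexicographic on (name, value)
  let grouped : PySem.Dict String (List (String × Int)) :=
    (PySem.List.sorted2 constants (fun p => p.1) (fun p => p.2)).foldl
      (fun grouped nv =>
        if PySem.Str.isIn "_" nv.1 then
          let pfx := ((PySem.Str.split? nv.1 "_").getD []).headD ""   -- name.split('_')[0]
          let grouped := if grouped.contains pfx then grouped else grouped.insert pfx []
          grouped.modify pfx [] (fun l => l ++ [nv])
        else
          let grouped := if grouped.contains "MISC" then grouped else grouped.insert "MISC" []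
          grouped.modify "MISC" [] (fun l => l ++ [nv]))
      PySem.Dict.empty
  -- sorted(grouped.items()): dict keys are distinct, so Python's tuple comparison never reaches
  -- the bucket lists; sorting the items by key is exact here
  (PySem.List.sorted grouped.items (fun p => p.1)).foldl
    (fun code gi =>
      let code := code ++ (if gi.1 != "MISC" then "\n# " ++ pyTitle gi.1 ++ " Items\n"
                           else "\n# Miscellaneous\n")
      gi.2.foldl (fun code nv => code ++ (nv.1 ++ " = " ++ PySem.Int.toStr nv.2 ++ "\n")) code)
    code

-- ===== PORT B =====
def groupOf (name : String) : String :=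
  if PySem.Str.isIn "_" name then ((PySem.Str.split? name "_").getD []).headD "" else "MISC"

def generate_python_constants_alt (constants : List (String × Int)) : String :=
  let items := PySem.List.sorted2 constants (fun p => p.1) (fun p => p.2)
  let groups := PySem.List.sorted (PySem.Set.ofList (items.map (fun nv => groupOf nv.1))) (fun g => g)
  let parts := groups.foldl
    (fun parts g =>
      (parts ++ [if g == "MISC" then "\n# Miscellaneous\n" else "\n# " ++ pyTitle g ++ " Items\n"])
        ++ (items.filter (fun nv => groupOf nv.1 == g)).map
             (fun nv => nv.1 ++ " = " ++ PySem.Int.toStr nv.2 ++ "\n"))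
    ["# Game Constants\n"]
  PySem.Str.join "" parts

-- ===== PRECONDITION & SPEC =====
def Spec_generate_python_constants (constants : List (String × Int)) (out : String) : Prop := out = generate_python_constants_alt constants
instance (constants : List (String × Int)) (out : String) : Decidable (Spec_generate_python_constants constants out) := by unfold Spec_generate_python_constants; infer_instance

-- ===== CLAIM (what is proved, stated in full; the proofs are below) =====
def Claim_equal_generate_python_constants : Prop := ∀ (constants : List (String × Int)), Dom_generate_python_constants constants → Spec_generate_python_constants constants (generate_python_constants constants)

-- ===== LEMMAS AND PROOFS =====

theorem intercalate_nil_flatten (l : List (List Char)) : List.intercalate [] l = l.flatten := by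
  unfold List.intercalate
  induction l with
  | nil => rfl
  | cons x xs ih => cases xs <;> simp_all

theorem strJoin_nil : PySem.Str.join "" [] = "" := rfl

theorem strJoin_cons (x : String) (xs : List String) :
    PySem.Str.join "" (x :: xs) = x ++ PySem.Str.join "" xs := by
  apply String.toList_inj.mp
  simp [PySem.Str.join, PySem.Chars.join, intercalate_nil_flatten]

theorem strJoin_append (a b : List String) :
    PySem.Str.join "" (a ++ b) = PySem.Str.join "" a ++ PySem.Str.join "" b := by
  apply String.toList_inj.mp
  simp [PySem.Str.join, PySem.Chars.join, intercalate_nil_flatten]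

theorem lineFold (line : String × Int → String) (l : List (String × Int)) (c : String) :
    l.foldl (fun code nv => code ++ line nv) c = c ++ PySem.Str.join "" (l.map line) := by
  induction l generalizing c with
  | nil => simp [strJoin_nil]
  | cons a l ih => simp [ih, strJoin_cons, String.append_assoc]

theorem emitFold (header : String → String) (line : String × Int → String)
    (flt : String → List (String × Int)) (gs : List String) (parts : List String) :
    (gs.map (fun g => (g, flt g))).foldl
        (fun code gi => gi.2.foldl (fun code nv => code ++ line nv) (code ++ header gi.1))
        (PySem.Str.join "" parts)
      = PySem.Str.join "" (gs.foldl
          (fun parts g => (parts ++ [header g]) ++ (flt g).map line) parts) := by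
  induction gs generalizing parts with
  | nil => rfl
  | cons g gs ih =>
    simp only [List.map_cons, List.foldl_cons]
    rw [lineFold]
    rw [show PySem.Str.join "" parts ++ header g ++ PySem.Str.join "" ((flt g).map line)
          = PySem.Str.join "" ((parts ++ [header g]) ++ (flt g).map line) by
        simp [strJoin_append, strJoin_cons, String.append_assoc]]
    exact ih _

theorem ensure_modify {ν : Type} (d : PySem.Dict String (List ν)) (k : String) (f : List ν → List ν) :
    (if d.contains k then d else d.insert k []).modify k [] f = d.modify k [] f := by
  by_cases h : d.contains k
  · simp [h]
  · simp only [h, Bool.false_eq_true, if_false, PySem.Dict.modify]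
    rw [PySem.Dict.getD_insert_self, PySem.Dict.insert_insert_self,
        PySem.Dict.getD_of_not_contains _ _ (by simpa using h)]

theorem main_eq (constants : List (String × Int)) :
    generate_python_constants constants = generate_python_constants_alt constants := by
  unfold generate_python_constants generate_python_constants_alt
  simp only []
  set items := PySem.List.sorted2 constants (fun p => p.1) (fun p => p.2) with hitems
  rw [show (fun (grouped : PySem.Dict String (List (String × Int))) (nv : String × Int) =>
      if PySem.Str.isIn "_" nv.1 then
        (if grouped.contains (((PySem.Str.split? nv.1 "_").getD []).headD "") then grouped
         else grouped.insert (((PySem.Str.split? nv.1 "_").getD []).headD "") []).modify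
          (((PySem.Str.split? nv.1 "_").getD []).headD "") [] (fun l => l ++ [nv])
      else
        (if grouped.contains "MISC" then grouped else grouped.insert "MISC" []).modify
          "MISC" [] (fun l => l ++ [nv]))
    = fun grouped nv => grouped.modify (groupOf nv.1) [] (fun l => l ++ [nv]) by
      funext grouped nv
      by_cases h : PySem.Str.isIn "_" nv.1 <;> simp only [groupOf, h, if_true, if_false, Bool.false_eq_true, ensure_modify]]
  rw [show (items.foldl (fun d nv => d.modify (groupOf nv.1) [] (fun l => l ++ [nv])) PySem.Dict.empty)
      = (items.map (fun nv => (groupOf nv.1, nv))).foldl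
          (fun d p => d.modify p.1 [] (fun l => l ++ [p.2])) PySem.Dict.empty from (List.foldl_map (f := fun nv : String × Int => (groupOf nv.1, nv))
        (g := fun d p => d.modify p.1 [] (fun l => l ++ [p.2])) (l := items) (init := PySem.Dict.empty)).symm]
  set grouped := (items.map (fun nv => (groupOf nv.1, nv))).foldl
      (fun d p => d.modify p.1 [] (fun l => l ++ [p.2])) PySem.Dict.empty with hgrouped
  set G := PySem.Set.ofList (items.map (fun nv => groupOf nv.1)) with hG
  set flt := fun g => items.filter (fun nv => groupOf nv.1 == g) with hflt
  have hkeys : grouped.keys = G := by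
    rw [hgrouped, PySem.Dict.keys_foldl_modify_key, PySem.Dict.keys_empty, PySem.Set.update_nil_left,
        List.map_map, hG]
    simp [Function.comp_def]
  have hnodup : grouped.keys.Nodup := by
    rw [hkeys]; exact PySem.Set.nodup_ofList _
  have hgetD : ∀ g, grouped.getD g [] = flt g := by
    intro g
    rw [hgrouped, PySem.Dict.getD_foldl_modify_append, PySem.Dict.getD_empty, List.filter_map,
        List.map_map]
    simp [hflt, Function.comp_def]
  have hitems2 : grouped.items = G.map (fun g => (g, flt g)) := by
    rw [PySem.Dict.items_eq_map_keys grouped hnodup [], hkeys]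
    exact List.map_congr_left (fun g _ => by rw [hgetD])
  have hsorted : PySem.List.sorted grouped.items (fun p => p.1)
      = (PySem.List.sorted G (fun g => g)).map (fun g => (g, flt g)) := by
    apply PySem.List.sorted_eq_of_perm_of_pairwise_lt
    · rw [hitems2]; exact (PySem.List.sorted_perm G (fun g => g) false).map _
    · exact List.pairwise_map.mpr (PySem.List.sorted_ofList_pairwise_lt _)
  rw [hsorted]
  rw [show (fun (code : String) (gi : String × List (String × Int)) =>
        List.foldl (fun code nv => code ++ (nv.1 ++ " = " ++ PySem.Int.toStr nv.2 ++ "\n"))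
          (code ++ if (gi.1 != "MISC") = true then "\n# " ++ pyTitle gi.1 ++ " Items\n"
                   else "\n# Miscellaneous\n") gi.2)
      = (fun code gi => List.foldl (fun code nv => code ++ (nv.1 ++ " = " ++ PySem.Int.toStr nv.2 ++ "\n"))
          (code ++ (fun g => if (g == "MISC") = true then "\n# Miscellaneous\n"
                             else "\n# " ++ pyTitle g ++ " Items\n") gi.1) gi.2) by
      funext code gi; by_cases h : gi.1 = "MISC" <;> simp [h]]
  have h0 : PySem.Str.join "" ["# Game Constants\n"] = "# Game Constants\n" := by
    rw [strJoin_cons, strJoin_nil, String.append_empty]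
  have := emitFold
      (header := fun g => if (g == "MISC") = true then "\n# Miscellaneous\n"
                          else "\n# " ++ pyTitle g ++ " Items\n")
      (line := fun nv => nv.1 ++ " = " ++ PySem.Int.toStr nv.2 ++ "\n")
      (flt := fun g => items.filter (fun nv => groupOf nv.1 == g))
      (gs := PySem.List.sorted G (fun g => g)) (parts := ["# Game Constants\n"])
  rw [h0] at this
  exact this

-- ===== VERDICT (by name: the statement is the Claim_ definition above) =====
theorem generate_python_constants_spec : Claim_equal_generate_python_constants := by
  intro constants _
  unfold Spec_generate_python_constants
  exact main_eq constants
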